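-- pv_equiv track=rewrite | github.com/patanet7/livetranslate | modules/orchestration-service/src/routers/audio_original_backup.py | _estimate_latency_difference
-- ===== SOURCE A (Python) =====
-- def _estimate_latency_difference(stages1: set, stages2: set) -> str:
--     """Estimate relative latency difference between stage sets."""
--     # Latency weights for different stages (in ms)
--     latency_weights = {
--         "vad": 5, "voice_filter": 8, "noise_reduction": 15,
--         "voice_enhancement": 10, "equalizer": 12, "spectral_denoising": 20,
--         "conventional_denoising": 8, "lufs_normalization": 18,
--         "agc": 12, "compression": 8, "limiter": 6
--     }
--
--     latency1 = sum(latency_weights.get(stage, 10) for stage in stages1)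
--     latency2 = sum(latency_weights.get(stage, 10) for stage in stages2)
--
--     diff = latency2 - latency1
--     if abs(diff) < 5:
--         return "similar"
--     elif diff > 0:
--         return f"preset1 is {diff:.0f}ms faster"
--     else:
--         return f"preset2 is {abs(diff):.0f}ms faster"
-- ===== SOURCE B (Python) =====
-- def _estimate_latency_difference(stages1: set, stages2: set) -> str:
--     """Estimate relative latency difference between stage sets."""
--     latency_weights = {
--         "vad": 5, "voice_filter": 8, "noise_reduction": 15,
--         "voice_enhancement": 10, "equalizer": 12, "spectral_denoising": 20,
--         "conventional_denoising": 8, "lufs_normalization": 18,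
--         "agc": 12, "compression": 8, "limiter": 6
--     }
--
--     # Shared stages contribute the same fixed weight to both sums, so they
--     # cancel: only the symmetric difference matters.
--     only1 = [s for s in stages1 if s not in stages2]
--     only2 = [s for s in stages2 if s not in stages1]
--     diff = (sum(latency_weights.get(s, 10) for s in only2)
--             - sum(latency_weights.get(s, 10) for s in only1))
--
--     if abs(diff) < 5:
--         return "similar"
--     elif diff > 0:
--         return f"preset1 is {diff:.0f}ms faster"
--     else:
--         return f"preset2 is {abs(diff):.0f}ms faster"
-- ===== Notes on version B (the rewrite author's own statement) =====
-- stated objective: alternative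
-- what changed: B sums latency weights only over the symmetric difference of the two stage sets (stages in both cancel because each stage has one fixed weight), instead of summing the full latency of each set and subtracting.
import Mathlib
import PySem

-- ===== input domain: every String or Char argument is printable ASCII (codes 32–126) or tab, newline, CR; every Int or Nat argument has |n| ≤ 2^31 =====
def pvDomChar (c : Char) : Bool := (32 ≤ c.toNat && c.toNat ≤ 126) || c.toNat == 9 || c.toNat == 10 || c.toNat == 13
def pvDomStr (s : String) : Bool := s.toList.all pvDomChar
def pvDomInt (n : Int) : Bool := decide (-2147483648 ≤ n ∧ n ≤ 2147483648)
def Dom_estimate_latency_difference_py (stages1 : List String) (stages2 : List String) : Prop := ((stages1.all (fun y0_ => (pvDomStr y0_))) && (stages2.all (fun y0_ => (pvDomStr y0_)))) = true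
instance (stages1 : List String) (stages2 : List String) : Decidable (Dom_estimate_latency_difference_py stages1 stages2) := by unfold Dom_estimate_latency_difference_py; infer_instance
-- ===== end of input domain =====

-- B sums latency weights only over the symmetric difference of the two stage sets
-- (shared stages cancel since each stage has one fixed weight), instead of summing
-- the full latency of each set and subtracting.  Objective: alternative algorithm.

-- ===== PORT A =====
def pvLatencyWeights : PySem.Dict String Int :=
  PySem.Dict.ofList
    [("vad", 5), ("voice_filter", 8), ("noise_reduction", 15),
     ("voice_enhancement", 10), ("equalizer", 12), ("spectral_denoising", 20),
     ("conventional_denoising", 8), ("lufs_normalization", 18),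
     ("agc", 12), ("compression", 8), ("limiter", 6)]

def estimate_latency_difference_py (stages1 : List String) (stages2 : List String) : String :=
  let latency1 : Int := stages1.foldl (fun acc stage => acc + pvLatencyWeights.getD stage 10) 0
  let latency2 : Int := stages2.foldl (fun acc stage => acc + pvLatencyWeights.getD stage 10) 0
  let diff : Int := latency2 - latency1
  if |diff| < 5 then "similar"
  else if diff > 0 then "preset1 is " ++ PySem.Int.toStr diff ++ "ms faster"
  else "preset2 is " ++ PySem.Int.toStr |diff| ++ "ms faster"

-- ===== PORT B =====
def estimate_latency_difference_py_alt (stages1 : List String) (stages2 : List String) : String :=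
  let only1 : List String := stages1.filter (fun s => !(stages2.contains s))
  let only2 : List String := stages2.filter (fun s => !(stages1.contains s))
  let diff : Int :=
    (only2.foldl (fun acc s => acc + pvLatencyWeights.getD s 10) 0)
      - (only1.foldl (fun acc s => acc + pvLatencyWeights.getD s 10) 0)
  if |diff| < 5 then "similar"
  else if diff > 0 then "preset1 is " ++ PySem.Int.toStr diff ++ "ms faster"
  else "preset2 is " ++ PySem.Int.toStr |diff| ++ "ms faster"

-- ===== PRECONDITION & SPEC =====
-- The Python parameters are sets; under the type convention the lists hold the
-- DISTINCT elements of each set, so Pre_ requires both lists to be duplicate-free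
-- (a list with duplicates represents no Python input of A).
def Pre_estimate_latency_difference_py (stages1 : List String) (stages2 : List String) : Prop :=
  stages1.Nodup ∧ stages2.Nodup
instance (stages1 : List String) (stages2 : List String) : Decidable (Pre_estimate_latency_difference_py stages1 stages2) := by unfold Pre_estimate_latency_difference_py; infer_instance

def pvWitness_estimate_latency_difference_py : List String × List String := (["vad"], ["agc", "vad"])

def Spec_estimate_latency_difference_py (stages1 : List String) (stages2 : List String) (out : String) : Prop := out = estimate_latency_difference_py_alt stages1 stages2
instance (stages1 : List String) (stages2 : List String) (out : String) : Decidable (Spec_estimate_latency_difference_py stages1 stages2 out) := by unfold Spec_estimate_latency_difference_py; infer_instance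

-- ===== CLAIM (what is proved, stated in full; the proofs are below) =====
def Claim_equal_estimate_latency_difference_py : Prop := ∀ (stages1 : List String) (stages2 : List String), Dom_estimate_latency_difference_py stages1 stages2 → Pre_estimate_latency_difference_py stages1 stages2 → Spec_estimate_latency_difference_py stages1 stages2 (estimate_latency_difference_py stages1 stages2)

-- ===== LEMMAS AND PROOFS =====

-- foldl-sum as sum of mapped weights
theorem pvFoldl_eq_sum (l : List String) (a : Int) :
    l.foldl (fun acc s => acc + pvLatencyWeights.getD s 10) a
      = a + (l.map (fun s => pvLatencyWeights.getD s 10)).sum := by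
  induction l generalizing a with
  | nil => simp
  | cons x t ih => simp [List.foldl_cons, ih]; ring

-- split a sum over a list into the part inside l' and the part outside
theorem pvSum_split (l l' : List String) :
    ((l.map (fun s => pvLatencyWeights.getD s 10)).sum : Int)
      = ((l.filter (fun s => l'.contains s)).map (fun s => pvLatencyWeights.getD s 10)).sum
        + ((l.filter (fun s => !(l'.contains s))).map (fun s => pvLatencyWeights.getD s 10)).sum := by
  have hp := List.filter_append_perm (fun s => l'.contains s) l
  have h := (hp.map (fun s => pvLatencyWeights.getD s 10)).sum_eq
  rw [List.map_append, List.sum_append] at h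
  omega

-- the shared parts have equal weight sums (both lists Nodup)
theorem pvShared_eq (l1 l2 : List String) (h1 : l1.Nodup) (h2 : l2.Nodup) :
    ((l1.filter (fun s => l2.contains s)).map (fun s => pvLatencyWeights.getD s 10)).sum
      = ((l2.filter (fun s => l1.contains s)).map (fun s => pvLatencyWeights.getD s 10)).sum := by
  have hperm : (l1.filter (fun s => l2.contains s)).Perm (l2.filter (fun s => l1.contains s)) := by
    rw [List.perm_ext_iff_of_nodup (h1.filter _) (h2.filter _)]
    intro x
    simp [List.mem_filter]
    tauto
  exact (hperm.map _).sum_eq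

-- ===== VERDICT (by name: the statement is the Claim_ definition above) =====
theorem estimate_latency_difference_py_spec : Claim_equal_estimate_latency_difference_py := by
  intro stages1 stages2 _ hpre
  obtain ⟨h1, h2⟩ := hpre
  show estimate_latency_difference_py stages1 stages2 = estimate_latency_difference_py_alt stages1 stages2
  unfold estimate_latency_difference_py estimate_latency_difference_py_alt
  have hdiff :
      stages2.foldl (fun acc stage => acc + pvLatencyWeights.getD stage 10) 0
        - stages1.foldl (fun acc stage => acc + pvLatencyWeights.getD stage 10) 0
      = ((stages2.filter (fun s => !(stages1.contains s))).foldl (fun acc s => acc + pvLatencyWeights.getD s 10) 0)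
        - ((stages1.filter (fun s => !(stages2.contains s))).foldl (fun acc s => acc + pvLatencyWeights.getD s 10) 0) := by
    rw [pvFoldl_eq_sum, pvFoldl_eq_sum, pvFoldl_eq_sum, pvFoldl_eq_sum,
        pvSum_split stages1 stages2, pvSum_split stages2 stages1,
        pvShared_eq stages1 stages2 h1 h2]
    ring
  simp only []
  rw [hdiff]
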